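-- pv_equiv track=rewrite | github.com/notiho/ancient-chinese-math-problems | batch_outputs/20250124_200738/few-shot-no-restrictions/failed/孫子算經_3_22_3.py | calculate_total_items
-- ===== SOURCE A (Python) =====
-- def calculate_total_items(perimeter):
--     # Convert the perimeter to a string for digit manipulation
--     digits = list(str(perimeter))
--     total = 0
--
--     while digits:
--         # Step 1: Take the leftmost digit and subtract 8
--         left_digit = int(digits.pop(0))  # Remove the leftmost digit
--         left_digit -= 8
--
--         # Step 2: Add the rightmost digit (if any)
--         if digits:
--             right_digit = int(digits.pop(-1))  # Remove the rightmost digit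
--         else:
--             right_digit = 0
--
--         # Add the adjusted left digit and right digit to the total
--         total += max(0, left_digit) + right_digit
--
--     # Step 3: Add 1 to the result
--     total += 1
--
--     return total
-- ===== SOURCE B (Python) =====
-- def calculate_total_items(perimeter):
--     s = str(perimeter)
--     mid = (len(s) + 1) // 2
--     total = 1
--     for c in s[:mid]:
--         total += max(0, int(c) - 8)
--     for c in s[mid:]:
--         total += int(c)
--     return total
-- ===== Notes on version B (the rewrite author's own statement) =====
-- stated objective: simpler
-- what changed: Replaces A's interleaved pop-from-both-ends while loop with two independent forward passes: sum max(0,d-8) over the first ceil(n/2) digits and sum d over the remaining digits of the decimal string.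
import Mathlib
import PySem

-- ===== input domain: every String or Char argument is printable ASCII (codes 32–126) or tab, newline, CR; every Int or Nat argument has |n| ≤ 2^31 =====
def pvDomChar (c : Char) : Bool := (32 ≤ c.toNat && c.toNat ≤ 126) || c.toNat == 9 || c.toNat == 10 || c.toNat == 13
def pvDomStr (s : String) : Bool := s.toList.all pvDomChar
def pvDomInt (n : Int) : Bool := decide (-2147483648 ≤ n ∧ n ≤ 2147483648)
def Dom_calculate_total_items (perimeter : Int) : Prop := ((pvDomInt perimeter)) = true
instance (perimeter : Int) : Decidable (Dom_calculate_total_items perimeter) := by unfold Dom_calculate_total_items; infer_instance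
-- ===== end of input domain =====

-- B replaces A's interleaved pop-from-both-ends loop by two independent forward passes over
-- the two halves of the decimal string (objective: simpler).

-- int(c) for a single char c: exact for '0'..'9'; Pre_ (perimeter ≥ 0) guarantees every char
-- of str(perimeter) is a digit (Python raises ValueError on the '-' of a negative number).
def pvDigit (c : Char) : Int := (c.toNat : Int) - 48

-- ===== PORT A =====
-- while digits: pop(0) → max(0, d-8); if digits: pop(-1) → d; accumulate
def pvLoopA : List Char → Int
  | [] => 0
  | x :: xs =>
      max 0 (pvDigit x - 8) + ((xs.getLast?).map pvDigit).getD 0 + pvLoopA xs.dropLast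
  termination_by l => l.length
  decreasing_by simp [List.length_dropLast]

def calculate_total_items (perimeter : Int) : Int :=
  pvLoopA (PySem.Int.toStr perimeter).toList + 1

-- ===== PORT B =====
def calculate_total_items_alt (perimeter : Int) : Int :=
  let s := (PySem.Int.toStr perimeter).toList
  let mid := (s.length + 1) / 2
  let total := (s.take mid).foldl (fun t c => t + max 0 (pvDigit c - 8)) 1
  (s.drop mid).foldl (fun t c => t + pvDigit c) total

-- ===== PRECONDITION & SPEC =====
-- Pre_ excludes negative perimeters, on which both A and B raise ValueError at int('-').
def Pre_calculate_total_items (perimeter : Int) : Prop := 0 ≤ perimeter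
instance (perimeter : Int) : Decidable (Pre_calculate_total_items perimeter) := by unfold Pre_calculate_total_items; infer_instance
def pvWitness_calculate_total_items : Int := (1234)

def Spec_calculate_total_items (perimeter : Int) (out : Int) : Prop := out = calculate_total_items_alt perimeter
instance (perimeter : Int) (out : Int) : Decidable (Spec_calculate_total_items perimeter out) := by unfold Spec_calculate_total_items; infer_instance

-- ===== CLAIM (what is proved, stated in full; the proofs are below) =====
def Claim_equal_calculate_total_items : Prop := ∀ (perimeter : Int), Dom_calculate_total_items perimeter → Pre_calculate_total_items perimeter → Spec_calculate_total_items perimeter (calculate_total_items perimeter)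

-- ===== LEMMAS AND PROOFS =====

theorem pvLoopA_nil : pvLoopA [] = 0 := by rw [pvLoopA]

-- A's loop consumes the first ⌈n/2⌉ chars as "left" digits and the rest as "right" digits.
theorem pvLoopA_eq_aux : ∀ (n : Nat) (l : List Char), l.length = n →
    pvLoopA l =
      ((l.take ((l.length + 1) / 2)).map (fun c => max 0 (pvDigit c - 8))).sum +
      ((l.drop ((l.length + 1) / 2)).map pvDigit).sum := by
  intro n
  induction n using Nat.strong_induction_on with
  | _ n ih =>
    intro l hl
    match l with
    | [] => simp [pvLoopA_nil]
    | x :: xs =>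
      rcases xs.eq_nil_or_concat with rfl | ⟨ys, z, rfl⟩
      <;> simp only [List.concat_eq_append] at *
      · rw [pvLoopA]; simp [pvLoopA_nil]
      · have hlen : ys.length < n := by
          simp at hl; omega
        have ihys := ih ys.length hlen ys rfl
        have hm : ((x :: (ys ++ [z])).length + 1) / 2 = (ys.length + 1) / 2 + 1 := by
          simp; omega
        have hle : (ys.length + 1) / 2 ≤ ys.length := by omega
        rw [hm]
        have hA : pvLoopA (x :: (ys ++ [z])) =
            max 0 (pvDigit x - 8) + pvDigit z + pvLoopA ys := by
          rw [pvLoopA]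
          simp
        rw [hA, ihys]
        rw [List.take_succ_cons, List.drop_succ_cons,
          List.take_append_of_le_length hle, List.drop_append_of_le_length hle]
        simp
        ring

theorem pvLoopA_eq (l : List Char) :
    pvLoopA l =
      ((l.take ((l.length + 1) / 2)).map (fun c => max 0 (pvDigit c - 8))).sum +
      ((l.drop ((l.length + 1) / 2)).map pvDigit).sum :=
  pvLoopA_eq_aux l.length l rfl

theorem calculate_total_items_eq (p : Int) :
    calculate_total_items p = calculate_total_items_alt p := by
  have h := pvLoopA_eq (PySem.Int.toStr p).toList
  simp only [calculate_total_items, calculate_total_items_alt, h,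
    PySem.List.foldl_add]
  ring

-- ===== VERDICT (by name: the statement is the Claim_ definition above) =====
theorem calculate_total_items_spec : Claim_equal_calculate_total_items := by
  intro p _ _
  exact calculate_total_items_eq p
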